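-- pv_equiv track=rewrite | github.com/DeathGOD7/FIFA-3D-Importer-Exporter | test/test.py | GetTextureFormat
-- ===== SOURCE A (Python) =====
-- from enum import Enum
--
-- class TextureFormat(int, Enum):
-- 	DXT1 = 0,
-- 	DXT3 = 1,
-- 	DXT5 = 2,
-- 	A8R8G8B8 = 3,
-- 	GREY8 = 4,
-- 	GREY8ALFA8 = 5,
-- 	RGBA = 6,
-- 	ATI2 = 7,
-- 	ATI1 = 12,
-- 	A4R4G4B4 = 109,
-- 	R5G6B5 = 120,
-- 	X1R5G5B5 = 126,
-- 	BIT8 = 123,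
-- 	R8G8B8 = 127
--
-- def GetTextureFormat(id):
-- 	values = [item.value for item in TextureFormat]
-- 	temp = ""
-- 	if id in values:
-- 		temp = TextureFormat(id).name
-- 	else:
-- 		temp = "Unknown Texture Format"
--
-- 	return temp
-- ===== SOURCE B (Python) =====
-- _UNKNOWN = "Unknown Texture Format"
--
-- # Dense direct-address table: all enum values lie in 0..127, so precompute a
-- # 128-slot array once and answer each query with one bounds check + one index.
-- _TABLE = [_UNKNOWN] * 128
-- for _value, _name in [(0, "DXT1"), (1, "DXT3"), (2, "DXT5"), (3, "A8R8G8B8"),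
--                       (4, "GREY8"), (5, "GREY8ALFA8"), (6, "RGBA"), (7, "ATI2"),
--                       (12, "ATI1"), (109, "A4R4G4B4"), (120, "R5G6B5"),
--                       (126, "X1R5G5B5"), (123, "BIT8"), (127, "R8G8B8")]:
--     _TABLE[_value] = _name
--
-- def GetTextureFormat(id):
--     if 0 <= id < 128:
--         return _TABLE[id]
--     return _UNKNOWN
-- ===== Notes on version B (the rewrite author's own statement) =====
-- stated objective: alternative
-- what changed: Replaces the per-call rebuild of the enum's value list, the linear membership scan and the second enum lookup by a dense 128-slot direct-address table precomputed once, so each call is a single bounds check plus one array index.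
import Mathlib
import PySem

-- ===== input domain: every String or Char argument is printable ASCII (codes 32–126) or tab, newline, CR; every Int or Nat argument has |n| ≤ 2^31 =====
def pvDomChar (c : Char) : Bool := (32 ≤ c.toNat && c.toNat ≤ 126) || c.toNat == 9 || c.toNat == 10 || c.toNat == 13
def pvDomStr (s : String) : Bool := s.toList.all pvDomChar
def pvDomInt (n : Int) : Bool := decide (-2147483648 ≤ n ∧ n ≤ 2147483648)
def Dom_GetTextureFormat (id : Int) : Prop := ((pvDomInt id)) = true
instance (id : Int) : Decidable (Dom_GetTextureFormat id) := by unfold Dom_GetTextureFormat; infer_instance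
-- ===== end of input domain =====

-- B replaces A's per-call value-list rebuild + membership scan + enum lookup by a dense
-- 128-slot direct-address table built once; each call is a bounds check plus one index.

-- The TextureFormat enum members, in definition order: (value, name).
def texMembers : List (Int × String) :=
  [(0, "DXT1"), (1, "DXT3"), (2, "DXT5"), (3, "A8R8G8B8"), (4, "GREY8"),
   (5, "GREY8ALFA8"), (6, "RGBA"), (7, "ATI2"), (12, "ATI1"), (109, "A4R4G4B4"),
   (120, "R5G6B5"), (126, "X1R5G5B5"), (123, "BIT8"), (127, "R8G8B8")]

-- ===== PORT A =====
-- TextureFormat(id).name: the (unique) member whose value is id; only called when it exists.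
def texNameOf (id : Int) : String :=
  (((texMembers.find? (fun p => p.1 == id)).map Prod.snd).getD "")

def GetTextureFormat (id : Int) : String :=
  let values := texMembers.map Prod.fst
  if values.contains id then texNameOf id
  else "Unknown Texture Format"

-- ===== PORT B =====
-- _TABLE: 128 slots filled by the build loop (every _value is a literal in 0..127,
-- so pySetD is exact for the Python list assignment _TABLE[_value] = _name).
def texTable : List String :=
  texMembers.foldl (fun t p => PySem.List.pySetD t p.1 p.2)
    (List.replicate 128 "Unknown Texture Format")

def GetTextureFormat_alt (id : Int) : String :=
  if 0 ≤ id ∧ id < 128 then PySem.List.pyGetD texTable id "Unknown Texture Format"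
  else "Unknown Texture Format"

-- ===== PRECONDITION & SPEC =====
def Spec_GetTextureFormat (id : Int) (out : String) : Prop := out = GetTextureFormat_alt id
instance (id : Int) (out : String) : Decidable (Spec_GetTextureFormat id out) := by unfold Spec_GetTextureFormat; infer_instance

-- ===== CLAIM =====
def Claim_equal_GetTextureFormat : Prop := ∀ (id : Int), Dom_GetTextureFormat id → Spec_GetTextureFormat id (GetTextureFormat id)

-- ===== LEMMAS AND PROOFS =====

-- ===== VERDICT =====
set_option maxRecDepth 8192 in
theorem GetTextureFormat_spec : Claim_equal_GetTextureFormat := by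
  intro id _
  unfold Spec_GetTextureFormat
  by_cases h : 0 ≤ id ∧ id < 128
  · obtain ⟨h0, h1⟩ := h
    interval_cases id <;> decide
  · have hA : GetTextureFormat id = "Unknown Texture Format" := by
      unfold GetTextureFormat
      rw [if_neg]
      simp only [texMembers, List.map, List.contains_cons, List.contains_nil,
        Bool.or_false, Bool.or_eq_true, beq_iff_eq]
      omega
    have hB : GetTextureFormat_alt id = "Unknown Texture Format" := by
      unfold GetTextureFormat_alt
      rw [if_neg h]
    rw [hA, hB]
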